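-- pv_equiv track=rewrite | github.com/Sesuu2003/Lenguaje-Matescript | AnalizadorLexico.py | esConstReal
-- ===== SOURCE A (Python) =====
-- from enum import Enum  # TAS Panda
--
-- class Sigma(Enum):
--     LETRA = "Letra"
--     DIGITO = "Digito"
--     CESPECIAL = "Caracter especial"
--     OPREL = "OpRel"
--     OPARITMETICO = "OpAritmetico"
--     COMILLAS = "Comillas"
--     PUNTO = "Punto"
--     OTRO = "Otro"
--
-- CARACTERES_ESPECIALES = {'_','@','#', '$', '%', '&','¿','?','¡', '!','|','°',' '}
--
-- OPERADORES_RELACIONALES = {'>','<','='}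
--
-- OPERADORES_ARITMETICOS = {'-','+','*','/','^'}
--
-- def car_a_simb(car):
--     if car == '"':
--         return Sigma.COMILLAS.value
--     elif car.isalpha():
--         return Sigma.LETRA.value
--     elif car.isdigit():
--         return Sigma.DIGITO.value
--     elif car in CARACTERES_ESPECIALES:
--         return Sigma.CESPECIAL.value
--     elif car in OPERADORES_RELACIONALES:
--         return Sigma.OPREL.value
--     elif car in OPERADORES_ARITMETICOS:
--         return Sigma.OPARITMETICO.value
--     elif car == '.':
--         return Sigma.PUNTO.value
--     else:
--         return Sigma.OTRO.value
--
-- class SigmaFloat(Enum):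
--      DIGITO = "Digito"
--      PUNTO = "Punto"
--      OTRO = "Otro"
--
-- def esConstReal(cadena:str) -> bool:
--     q0 = 0
--     F = {4}
--
--     # Q = {0,1,2,3,4}
--     Delta = {
--         (0, SigmaFloat.DIGITO.value): 1,
--         (0, SigmaFloat.PUNTO.value): 2,
--         (0, SigmaFloat.OTRO.value): 2,
--
--         (1, SigmaFloat.DIGITO.value): 1,
--         (1, SigmaFloat.OTRO.value): 2,
--         (1, SigmaFloat.PUNTO.value): 3,
--
--         (3, SigmaFloat.OTRO.value):2,
--         (3, SigmaFloat.PUNTO.value):2,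
--         (3, SigmaFloat.DIGITO.value):4,
--
--         (4, SigmaFloat.OTRO.value):2,
--         (4, SigmaFloat.PUNTO.value):2,
--         (4, SigmaFloat.DIGITO.value):4
--
--     }
--
--     estado_actual = q0
--     i=0
--     while (estado_actual !=2) and (i<= len(cadena)-1):
--         simbolo = car_a_simb(cadena[i])
--         if (simbolo != SigmaFloat.PUNTO.value) and (simbolo != SigmaFloat.DIGITO.value):
--             simbolo = SigmaFloat.OTRO.value
--         estado_actual = Delta.get((estado_actual,simbolo),estado_actual)
--         i +=1
--     return estado_actual in F
-- ===== SOURCE B (Python) =====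
-- def esConstReal(cadena: str) -> bool:
--     parts = cadena.split('.')
--     return len(parts) == 2 and parts[0].isdigit() and parts[1].isdigit()
-- ===== Notes on version B (the rewrite author's own statement) =====
-- stated objective: simpler
-- what changed: Replaces the explicit 5-state DFA with a transition-table dict by a single split on the dot character plus two str.isdigit() checks on the halves.
import Mathlib
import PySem

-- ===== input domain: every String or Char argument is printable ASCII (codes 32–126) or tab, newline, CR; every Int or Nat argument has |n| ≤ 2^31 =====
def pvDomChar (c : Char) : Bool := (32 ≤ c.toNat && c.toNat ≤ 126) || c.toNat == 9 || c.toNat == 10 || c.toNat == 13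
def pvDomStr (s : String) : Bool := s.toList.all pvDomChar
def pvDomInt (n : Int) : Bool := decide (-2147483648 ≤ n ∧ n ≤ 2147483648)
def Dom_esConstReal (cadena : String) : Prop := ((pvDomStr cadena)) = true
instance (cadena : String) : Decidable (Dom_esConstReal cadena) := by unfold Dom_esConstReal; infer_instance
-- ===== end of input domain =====

-- B replaces A's explicit 5-state DFA (transition-table dict walked character by character)
-- by one split on the dot separator plus two isdigit checks on the halves: simpler, same cost.

-- ===== PORT A =====
def pvCaracteresEspeciales : PySem.Set Char :=
  PySem.Set.ofList ['_', '@', '#', '$', '%', '&', '¿', '?', '¡', '!', '|', '°', ' ']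

def pvOperadoresRelacionales : PySem.Set Char := PySem.Set.ofList ['>', '<', '=']

def pvOperadoresAritmeticos : PySem.Set Char := PySem.Set.ofList ['-', '+', '*', '/', '^']

def carASimb (car : Char) : String :=
  if car = '"' then "Comillas"
  else if PySem.Chars.isalpha car then "Letra"
  else if PySem.Chars.isdigit car then "Digito"
  else if pvCaracteresEspeciales.contains car then "Caracter especial"
  else if pvOperadoresRelacionales.contains car then "OpRel"
  else if pvOperadoresAritmeticos.contains car then "OpAritmetico"
  else if car = '.' then "Punto"
  else "Otro"

def pvDelta : PySem.Dict (Int × String) Int :=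
  PySem.Dict.ofList
    [ ((0, "Digito"), 1), ((0, "Punto"), 2), ((0, "Otro"), 2),
      ((1, "Digito"), 1), ((1, "Otro"), 2), ((1, "Punto"), 3),
      ((3, "Otro"), 2), ((3, "Punto"), 2), ((3, "Digito"), 4),
      ((4, "Otro"), 2), ((4, "Punto"), 2), ((4, "Digito"), 4) ]

-- the while loop: state ≠ 2 and characters remain
def esConstRealLoop (st : Int) (cs : List Char) : Int :=
  match cs with
  | [] => st
  | c :: rest =>
    if st ≠ 2 then
      let s0 := carASimb c
      let simb := if s0 ≠ "Punto" ∧ s0 ≠ "Digito" then "Otro" else s0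
      esConstRealLoop (pvDelta.getD (st, simb) st) rest
    else st

def esConstReal (cadena : String) : Bool :=
  (PySem.Set.ofList [(4 : Int)]).contains (esConstRealLoop 0 cadena.toList)

-- ===== PORT B =====
def esConstReal_alt (cadena : String) : Bool :=
  match PySem.Str.split? cadena "." with
  | some parts =>
    match parts with
    | [a, b] => PySem.Str.strIsdigit a && PySem.Str.strIsdigit b
    | _ => false
  | none => false

-- ===== PRECONDITION & SPEC =====
def Spec_esConstReal (cadena : String) (out : Bool) : Prop := out = esConstReal_alt cadena
instance (cadena : String) (out : Bool) : Decidable (Spec_esConstReal cadena out) := by unfold Spec_esConstReal; infer_instance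

-- ===== CLAIM (what is proved, stated in full; the proofs are below) =====
def Claim_equal_esConstReal : Prop := ∀ (cadena : String), Dom_esConstReal cadena → Spec_esConstReal cadena (esConstReal cadena)

-- ===== LEMMAS AND PROOFS =====

-- B's value expressed over List Char: split on '.' with an accumulator of read chars (reversed)
def pvDot : List Char → List Char → List (List Char)
  | [], cur => [cur.reverse]
  | c :: rest, cur => if c = '.' then cur.reverse :: pvDot rest [] else pvDot rest (c :: cur)

def pvB (parts : List (List Char)) : Bool :=
  match parts with
  | [a, b] => PySem.Chars.strIsdigit a && PySem.Chars.strIsdigit b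
  | _ => false

lemma go_eq_pvDot : ∀ (l : List Char) (fuel : Nat) (cur : List Char) (acc : List (List Char)),
    l.length < fuel →
    PySem.Chars.splitOn.go ['.'] fuel l cur acc = acc.reverse ++ pvDot l cur := by
  intro l
  induction l with
  | nil =>
    intro fuel cur acc h
    cases fuel with
    | zero => omega
    | succ f => simp [PySem.Chars.splitOn.go, pvDot]
  | cons c rest ih =>
    intro fuel cur acc h
    cases fuel with
    | zero => omega
    | succ f =>
      by_cases hc : c = '.'
      · subst hc
        simp only [PySem.Chars.splitOn.go, List.isPrefixOf, BEq.rfl, Bool.true_and,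
          List.isPrefixOf_nil_left, if_pos, List.length_singleton, List.drop_one, List.tail_cons]
        rw [ih f [] (cur.reverse :: acc) (by simpa using Nat.lt_of_succ_lt_succ h)]
        simp [pvDot]
      · have hpf : List.isPrefixOf ['.'] (c :: rest) = false := by
          simp [List.isPrefixOf]; exact fun h' => absurd h'.symm hc
        simp only [PySem.Chars.splitOn.go, hpf, Bool.false_eq_true, if_false]
        rw [ih f (c :: cur) acc (by simpa using Nat.lt_of_succ_lt_succ h)]
        simp [pvDot, hc]

lemma splitOn_dot (cs : List Char) : PySem.Chars.splitOn cs ['.'] = pvDot cs [] := by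
  unfold PySem.Chars.splitOn
  rw [go_eq_pvDot cs (cs.length + 1) [] [] (Nat.lt_succ_self _)]
  simp

lemma pvDot_ne_nil : ∀ (cs cur : List Char), pvDot cs cur ≠ [] := by
  intro cs
  induction cs with
  | nil => intro cur; simp [pvDot]
  | cons c rest ih =>
    intro cur
    by_cases hc : c = '.'
    · simp [pvDot, hc]
    · simp only [pvDot, if_neg hc]; exact ih (c :: cur)

lemma strIsdigit_of_dot (l r : List Char) : PySem.Chars.strIsdigit (l ++ '.' :: r) = false := by
  unfold PySem.Chars.strIsdigit
  simp
  intro _ hdot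
  exact absurd hdot (by decide)

-- singleton characterization of pvDot
lemma pvDot_single (cs : List Char) : ∀ cur,
    (match pvDot cs cur with
      | [b] => PySem.Chars.strIsdigit b
      | _ => false) = PySem.Chars.strIsdigit (cur.reverse ++ cs) := by
  induction cs with
  | nil => intro cur; simp [pvDot]
  | cons c rest ih =>
    intro cur
    by_cases hc : c = '.'
    · subst hc
      simp only [pvDot, if_pos rfl]
      have hne := pvDot_ne_nil rest []
      rw [strIsdigit_of_dot]
      cases h : pvDot rest [] with
      | nil => exact absurd h hne
      | cons a t => cases t <;> rfl
    · simp only [pvDot, if_neg hc]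
      rw [ih (c :: cur)]
      simp

lemma pvB_false_of_bad (cs : List Char) : ∀ cur, cur.all PySem.Chars.isdigit = false →
    pvB (pvDot cs cur) = false := by
  induction cs with
  | nil => intro cur h; simp [pvDot, pvB]
  | cons c rest ih =>
    intro cur h
    by_cases hc : c = '.'
    · subst hc
      simp only [pvDot, if_pos rfl]
      have hcd : PySem.Chars.strIsdigit cur.reverse = false := by
        simp [PySem.Chars.strIsdigit]
        intro _
        simpa using h
      cases hp : pvDot rest [] with
      | nil => exact absurd hp (pvDot_ne_nil rest [])
      | cons a t =>
        cases t with
        | nil => simp [pvB, hcd]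
        | cons b u => rfl
    · simp only [pvDot, if_neg hc]
      exact ih (c :: cur) (by simp [h])

lemma simbNorm (c : Char) :
    (if carASimb c ≠ "Punto" ∧ carASimb c ≠ "Digito" then "Otro" else carASimb c)
      = (if PySem.Chars.isdigit c then "Digito" else if c = '.' then "Punto" else "Otro") := by
  by_cases hd : PySem.Chars.isdigit c = true
  · have h9 : '0' ≤ c ∧ c ≤ '9' := by simpa [PySem.Chars.isdigit] using hd
    have hq : c ≠ '"' := by rintro rfl; exact absurd h9.1 (by decide)
    have ha : PySem.Chars.isalpha c = false := by
      have h1 : c < 'A' := lt_of_le_of_lt h9.2 (by decide)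
      have h2 : c < 'a' := lt_of_le_of_lt h9.2 (by decide)
      simp [PySem.Chars.isalpha, PySem.Chars.isupper, PySem.Chars.islower]
      exact ⟨fun h => absurd h1 (not_lt.mpr h), fun h => absurd h2 (not_lt.mpr h)⟩
    simp [carASimb, hq, ha, hd]
  · by_cases hp : c = '.'
    · subst hp; decide
    · have hval : carASimb c ≠ "Punto" ∧ carASimb c ≠ "Digito" := by
        unfold carASimb
        split_ifs <;> simp_all
      simp [hval, hd, hp]

lemma loop_cons (st : Int) (h : st ≠ 2) (c : Char) (rest : List Char) :
    esConstRealLoop st (c :: rest)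
      = esConstRealLoop
          (pvDelta.getD (st, if PySem.Chars.isdigit c then "Digito" else if c = '.' then "Punto" else "Otro") st)
          rest := by
  rw [esConstRealLoop]
  simp only [if_pos h]
  rw [simbNorm]

lemma loop2 (cs : List Char) : esConstRealLoop 2 cs = 2 := by
  cases cs <;> simp [esConstRealLoop]

lemma loop4 : ∀ cs : List Char, decide (esConstRealLoop 4 cs = 4) = cs.all PySem.Chars.isdigit := by
  intro cs
  induction cs with
  | nil => simp [esConstRealLoop]
  | cons c rest ih =>
    rw [loop_cons 4 (by decide)]
    by_cases hc : PySem.Chars.isdigit c = true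
    · rw [hc, if_pos rfl]
      have : pvDelta.getD ((4 : Int), "Digito") 4 = 4 := by decide
      rw [this]
      simp [ih, hc]
    · have hc' : PySem.Chars.isdigit c = false := by simpa using hc
      rw [hc', if_neg (by simp)]
      have h2 : esConstRealLoop (pvDelta.getD ((4 : Int), if c = '.' then "Punto" else "Otro") 4) rest = 2 := by
        by_cases hp : c = '.'
        · rw [if_pos hp, (by decide : pvDelta.getD ((4 : Int), "Punto") 4 = 2)]; exact loop2 rest
        · rw [if_neg hp, (by decide : pvDelta.getD ((4 : Int), "Otro") 4 = 2)]; exact loop2 rest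
      rw [h2]
      simp [hc']

lemma loop3 (cs : List Char) : decide (esConstRealLoop 3 cs = 4) = PySem.Chars.strIsdigit cs := by
  cases cs with
  | nil => simp [esConstRealLoop, PySem.Chars.strIsdigit]
  | cons c rest =>
    rw [loop_cons 3 (by decide)]
    by_cases hc : PySem.Chars.isdigit c = true
    · rw [hc, if_pos rfl]
      rw [(by decide : pvDelta.getD ((3 : Int), "Digito") 3 = 4)]
      rw [loop4 rest]
      simp [PySem.Chars.strIsdigit, hc]
    · have hc' : PySem.Chars.isdigit c = false := by simpa using hc
      rw [hc', if_neg (by simp)]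
      have h2 : esConstRealLoop (pvDelta.getD ((3 : Int), if c = '.' then "Punto" else "Otro") 3) rest = 2 := by
        by_cases hp : c = '.'
        · rw [if_pos hp, (by decide : pvDelta.getD ((3 : Int), "Punto") 3 = 2)]; exact loop2 rest
        · rw [if_neg hp, (by decide : pvDelta.getD ((3 : Int), "Otro") 3 = 2)]; exact loop2 rest
      rw [h2]
      simp [PySem.Chars.strIsdigit, hc']

lemma loop1 : ∀ (cs cur : List Char), cur ≠ [] → cur.all PySem.Chars.isdigit = true →
    decide (esConstRealLoop 1 cs = 4) = pvB (pvDot cs cur) := by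
  intro cs
  induction cs with
  | nil =>
    intro cur _ _
    simp [esConstRealLoop, pvDot, pvB]
  | cons c rest ih =>
    intro cur hcur hdig
    rw [loop_cons 1 (by decide)]
    by_cases hc : PySem.Chars.isdigit c = true
    · rw [hc, if_pos rfl]
      rw [(by decide : pvDelta.getD ((1 : Int), "Digito") 1 = 1)]
      rw [ih (c :: cur) (by simp) (by simp [hc, hdig])]
      have hcp : c ≠ '.' := by rintro rfl; exact absurd hc (by decide)
      simp [pvDot, hcp]
    · have hc' : PySem.Chars.isdigit c = false := by simpa using hc
      rw [hc', if_neg (by simp)]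
      by_cases hp : c = '.'
      · subst hp
        rw [if_pos rfl, (by decide : pvDelta.getD ((1 : Int), "Punto") 1 = 3)]
        rw [loop3 rest]
        have hcd : PySem.Chars.strIsdigit cur.reverse = true := by
          simp [PySem.Chars.strIsdigit, hcur]
          simpa using hdig
        have hsingle := pvDot_single rest []
        simp only [List.reverse_nil, List.nil_append] at hsingle
        simp only [pvDot, if_pos rfl]
        cases hpd : pvDot rest [] with
        | nil => exact absurd hpd (pvDot_ne_nil rest [])
        | cons a t =>
          rw [hpd] at hsingle
          cases t with
          | nil =>
            simpa [pvB, hcd] using hsingle.symm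
          | cons b u =>
            simp only [pvB]
            simpa using hsingle.symm
      · rw [if_neg hp, (by decide : pvDelta.getD ((1 : Int), "Otro") 1 = 2)]
        rw [loop2 rest]
        simp only [pvDot, if_neg hp]
        rw [pvB_false_of_bad rest (c :: cur) (by simp [hc'])]
        rfl

lemma loop0 (cs : List Char) : decide (esConstRealLoop 0 cs = 4) = pvB (pvDot cs []) := by
  cases cs with
  | nil => decide
  | cons c rest =>
    rw [loop_cons 0 (by decide)]
    by_cases hc : PySem.Chars.isdigit c = true
    · rw [hc, if_pos rfl]
      rw [(by decide : pvDelta.getD ((0 : Int), "Digito") 0 = 1)]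
      rw [loop1 rest [c] (by simp) (by simp [hc])]
      have hcp : c ≠ '.' := by rintro rfl; exact absurd hc (by decide)
      simp [pvDot, hcp]
    · have hc' : PySem.Chars.isdigit c = false := by simpa using hc
      rw [hc', if_neg (by simp)]
      by_cases hp : c = '.'
      · subst hp
        rw [if_pos rfl, (by decide : pvDelta.getD ((0 : Int), "Punto") 0 = 2)]
        rw [loop2 rest]
        simp only [pvDot, if_pos rfl, List.reverse_nil]
        cases hpd : pvDot rest [] with
        | nil => exact absurd hpd (pvDot_ne_nil rest [])
        | cons a t =>
          cases t with
          | nil => simp [pvB, PySem.Chars.strIsdigit]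
          | cons b u => rfl
      · rw [if_neg hp, (by decide : pvDelta.getD ((0 : Int), "Otro") 0 = 2)]
        rw [loop2 rest]
        simp only [pvDot, if_neg hp]
        rw [pvB_false_of_bad rest [c] (by simp [hc'])]
        rfl

-- ===== VERDICT (by name: the statement is the Claim_ definition above) =====
theorem esConstReal_spec : Claim_equal_esConstReal := by
  intro cadena _
  unfold Spec_esConstReal esConstReal esConstReal_alt
  rw [show PySem.Str.split? cadena "." = some ((pvDot cadena.toList []).map String.ofList) by
    rw [PySem.Str.split?, PySem.Chars.split?]
    rw [if_neg (by decide : ¬(".".toList.isEmpty = true))]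
    rw [show ".".toList = ['.'] from rfl, splitOn_dot]
    rfl]
  have hcontains : (PySem.Set.ofList [(4 : Int)]).contains (esConstRealLoop 0 cadena.toList)
      = decide (esConstRealLoop 0 cadena.toList = 4) := by
    show List.contains [(4 : Int)] _ = _
    simp [List.contains_eq_mem]
  rw [hcontains, loop0]
  cases hpd : pvDot cadena.toList [] with
  | nil => exact absurd hpd (pvDot_ne_nil _ _)
  | cons a t =>
    cases t with
    | nil => rfl
    | cons b u =>
      cases u with
      | nil => simp [pvB, PySem.Str.strIsdigit]
      | cons _ _ => rfl
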